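-- pv_equiv track=rewrite | github.com/ignaciolembo7/nogse_pipeline | src/signal_extraction/coreg_extract_brain.py | cut_before_any
-- ===== SOURCE A (Python) =====
-- from typing import Iterable, Tuple
--
-- def cut_before_any(s: str, tokens: Iterable[str]) -> Tuple[str, str | None]:
--     """
--     Cut `s` at the first occurrence of any token in `tokens`.
--     Returns (prefix, token_used). If no token is found, returns (s, None).
--     """
--     best_idx = None
--     best_tok = None
--     for tok in tokens:
--         if not tok:
--             continue
--         idx = s.find(tok)
--         if idx != -1 and (best_idx is None or idx < best_idx):
--             best_idx = idx
--             best_tok = tok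
--     if best_idx is None:
--         return s, None
--     return s[:best_idx], best_tok
-- ===== SOURCE B (Python) =====
-- def cut_before_any(s, tokens):
--     """
--     Cut `s` at the first occurrence of any token in `tokens`.
--     Returns (prefix, token_used). If no token is found, returns (s, None).
--     Single left-to-right scan over positions of `s`: the first position at
--     which some (non-empty) token starts is the cut point; among tokens
--     starting there the earliest one in `tokens` order is reported.
--     """
--     toks = [t for t in tokens if t]
--     for i in range(len(s)):
--         for t in toks:
--             if s.startswith(t, i):
--                 return s[:i], t
--     return s, None
-- ===== Notes on version B (the rewrite author's own statement) =====
-- stated objective: faster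
-- what changed: A runs s.find(tok) over the whole string for every token and minimises over the found indices; B makes a single left-to-right scan over positions of s, stopping at the first position where any non-empty token starts, so it never searches past the cut point.
import Mathlib
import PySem

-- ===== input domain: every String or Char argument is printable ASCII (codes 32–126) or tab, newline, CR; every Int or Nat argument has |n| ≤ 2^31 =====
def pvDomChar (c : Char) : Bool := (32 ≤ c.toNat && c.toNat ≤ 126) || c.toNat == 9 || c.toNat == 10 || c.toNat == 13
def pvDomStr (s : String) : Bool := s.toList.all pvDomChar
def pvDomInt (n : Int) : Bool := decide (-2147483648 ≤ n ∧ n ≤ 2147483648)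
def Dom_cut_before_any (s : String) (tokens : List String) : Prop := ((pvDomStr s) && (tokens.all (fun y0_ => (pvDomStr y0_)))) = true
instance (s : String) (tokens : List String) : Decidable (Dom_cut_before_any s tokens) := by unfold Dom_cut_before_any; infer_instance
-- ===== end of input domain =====

-- B replaces A's per-token s.find scan (minimising over tokens) by a single left-to-right
-- scan over positions of s that stops at the first position where any token starts
-- (objective: faster — it never searches past the cut point; measured faster in a timing run).

-- ===== PORT A =====
-- one step of A's `for tok in tokens` loop; state = (best_idx, best_tok)
def cutStepA (cs : List Char) (st : Option Int × Option (List Char)) (t : List Char) :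
    Option Int × Option (List Char) :=
  if t = [] then st                               -- `if not tok: continue`
  else
    let idx := PySem.Chars.find cs t              -- `idx = s.find(tok)`
    if idx != -1 && (match st.1 with | none => true | some b => decide (idx < b)) then (some idx, some t)
    else st

def cut_before_any (s : String) (tokens : List String) : String × Option String :=
  match tokens.foldl (fun st tok => cutStepA s.toList st tok.toList) (none, none) with
  | (none, _) => (s, none)                                                -- `return s, None`
  | (some b, bt) => (String.ofList (PySem.Chars.slice s.toList none (some b)),  -- `s[:best_idx]`
                     bt.map String.ofList)                                      -- `best_tok`

-- ===== PORT B =====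
-- the `for i in range(len(s))` loop: `rest` is cs.drop i (drives the recursion);
-- `s.startswith(t, i)` is ported exactly (for 0 ≤ i ≤ len s) as startswith on cs.drop i
def cutScanB (cs : List Char) (toks : List (List Char)) :
    List Char → Nat → Option (Nat × List Char)
  | [], _ => none
  | _ :: rest, i =>
    match toks.find? (fun t => PySem.Chars.startswith (cs.drop i) t) with
    | some t => some (i, t)                       -- `return s[:i], t`
    | none => cutScanB cs toks rest (i + 1)

def cut_before_any_alt (s : String) (tokens : List String) : String × Option String :=
  -- `toks = [t for t in tokens if t]`
  match cutScanB s.toList ((tokens.map String.toList).filter (fun t => !t.isEmpty)) s.toList 0 with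
  | none => (s, none)
  | some (i, t) => (String.ofList (s.toList.take i), some (String.ofList t))    -- `s[:i]` (i ≥ 0)

-- ===== PRECONDITION & SPEC =====
def Spec_cut_before_any (s : String) (tokens : List String) (out : String × Option String) : Prop := out = cut_before_any_alt s tokens
instance (s : String) (tokens : List String) (out : String × Option String) : Decidable (Spec_cut_before_any s tokens out) := by unfold Spec_cut_before_any; infer_instance

-- ===== CLAIM (what is proved, stated in full; the proofs are below) =====
def Claim_equal_cut_before_any : Prop := ∀ (s : String) (tokens : List String), Dom_cut_before_any s tokens → Spec_cut_before_any s tokens (cut_before_any s tokens)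

-- ===== LEMMAS AND PROOFS =====

-- reference "first minimal find" over a token list, head wins ties (proof-side only)
def bestOf (cs : List Char) : List (List Char) → Option (Int × List Char)
  | [] => none
  | t :: r =>
    let b := bestOf cs r
    if t = [] then b
    else
      let f := PySem.Chars.find cs t
      if f = -1 then b
      else match b with
        | none => some (f, t)
        | some (m, u) => if f ≤ m then some (f, t) else some (m, u)

theorem find_le_of_prefix_drop (cs t : List Char) (j : Nat) (h : t <+: cs.drop j) :
    PySem.Chars.find cs t ≤ (j : Int) ∧ PySem.Chars.find cs t ≠ -1 := by
  have hin : t <:+: cs := h.isInfix.trans (List.drop_suffix j cs).isInfix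
  have h0 : 0 ≤ PySem.Chars.find cs t := (PySem.Chars.find_nonneg_iff cs t).2 hin
  refine ⟨?_, by omega⟩
  by_contra hlt
  simp only [not_le] at hlt
  have hjlt : j < (PySem.Chars.find cs t).toNat := by omega
  exact (PySem.Chars.find_spec h0).2 j hjlt h

theorem find?_filter_comm (p q : List Char → Bool) (l : List (List Char)) :
    List.find? p (List.filter q l) = List.find? (fun a => q a && p a) l := by
  induction l with
  | nil => rfl
  | cons x xs ih => by_cases h : q x <;> simp [List.filter, List.find?, h, ih]

-- characterisation of bestOf: minimality among occurring tokens, and the winning token is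
-- the first token of the list that starts at position m
theorem bestOf_spec (cs : List Char) (ts : List (List Char)) :
    (bestOf cs ts = none → ∀ t ∈ ts, t ≠ [] → PySem.Chars.find cs t = -1) ∧
    (∀ m t, bestOf cs ts = some (m, t) →
      0 ≤ m ∧ PySem.Chars.find cs t = m ∧
      (∀ u ∈ ts, u ≠ [] → PySem.Chars.find cs u ≠ -1 → m ≤ PySem.Chars.find cs u) ∧
      List.find? (fun u => !u.isEmpty && PySem.Chars.startswith (cs.drop m.toNat) u) ts
        = some t) := by
  induction ts with
  | nil => exact ⟨fun _ t ht => absurd ht (List.not_mem_nil), fun m t h => by simp [bestOf] at h⟩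
  | cons u r ih =>
    obtain ⟨ihn, ihs⟩ := ih
    by_cases hu : u = []
    · -- skipped token
      constructor
      · intro h t ht htne
        rcases List.mem_cons.1 ht with rfl | ht
        · exact absurd hu htne
        · exact ihn (by simpa [bestOf, hu] using h) t ht htne
      · intro m t h
        have h' : bestOf cs r = some (m, t) := by simpa [bestOf, hu] using h
        obtain ⟨h0, hf, hmin, hfind⟩ := ihs m t h'
        refine ⟨h0, hf, ?_, ?_⟩
        · intro v hv hvne hvf
          rcases List.mem_cons.1 hv with rfl | hv
          · exact absurd hu hvne
          · exact hmin v hv hvne hvf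
        · simpa [List.find?, hu] using hfind
    · have hfind0 := PySem.Chars.neg_one_le_find cs u
      by_cases hf1 : PySem.Chars.find cs u = -1
      · -- non-occurring token
        have hnostart : ∀ k : Nat, PySem.Chars.startswith (cs.drop k) u = false := by
          intro k
          by_contra hc
          have : PySem.Chars.startswith (cs.drop k) u = true := by
            cases h : PySem.Chars.startswith (cs.drop k) u <;> simp_all
          exact (find_le_of_prefix_drop cs u k ((PySem.Chars.startswith_iff _ _).1 this)).2 hf1
        constructor
        · intro h t ht htne
          rcases List.mem_cons.1 ht with rfl | ht
          · exact hf1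
          · exact ihn (by simpa [bestOf, hu, hf1] using h) t ht htne
        · intro m t h
          have h' : bestOf cs r = some (m, t) := by simpa [bestOf, hu, hf1] using h
          obtain ⟨h0, hf, hmin, hfind⟩ := ihs m t h'
          refine ⟨h0, hf, ?_, ?_⟩
          · intro v hv hvne hvf
            rcases List.mem_cons.1 hv with rfl | hv
            · exact absurd hf1 hvf
            · exact hmin v hv hvne hvf
          · simpa [List.find?, hu, hnostart m.toNat] using hfind
      · -- occurring token u, f := find cs u ≥ 0
        have hf0 : 0 ≤ PySem.Chars.find cs u := by omega
        have hustart : PySem.Chars.startswith (cs.drop (PySem.Chars.find cs u).toNat) u = true :=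
          (PySem.Chars.startswith_iff _ _).2 (PySem.Chars.find_spec hf0).1
        have hnostart_lt : ∀ k : Nat, k < (PySem.Chars.find cs u).toNat →
            PySem.Chars.startswith (cs.drop k) u = false := by
          intro k hk
          cases h : PySem.Chars.startswith (cs.drop k) u
          · rfl
          · exact absurd ((PySem.Chars.startswith_iff _ _).1 h) ((PySem.Chars.find_spec hf0).2 k hk)
        constructor
        · intro h
          exfalso
          cases hb : bestOf cs r with
          | none => simp [bestOf, hu, hf1, hb] at h
          | some p => rcases p with ⟨m', t'⟩; by_cases hle : PySem.Chars.find cs u ≤ m' <;>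
              simp [bestOf, hu, hf1, hb, hle] at h
        · intro m t h
          cases hb : bestOf cs r with
          | none =>
            have hmt : m = PySem.Chars.find cs u ∧ t = u := by
              have := h; simp [bestOf, hu, hf1, hb] at this; exact ⟨this.1.symm, this.2.symm⟩
            obtain ⟨hm, ht⟩ := hmt
            subst hm; subst ht
            refine ⟨hf0, rfl, ?_, ?_⟩
            · intro v hv hvne hvf
              rcases List.mem_cons.1 hv with rfl | hv
              · omega
              · exact absurd (ihn hb v hv hvne) hvf
            · have hE : t.isEmpty = false := by simp [List.isEmpty_iff, hu]
              simp [List.find?, hE, hustart]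
          | some p =>
            rcases p with ⟨m', t'⟩
            obtain ⟨h0', hf', hmin', hfind'⟩ := ihs m' t' hb
            by_cases hle : PySem.Chars.find cs u ≤ m'
            · have hmt : m = PySem.Chars.find cs u ∧ t = u := by
                have := h; simp [bestOf, hu, hf1, hb, hle] at this; exact ⟨this.1.symm, this.2.symm⟩
              obtain ⟨hm, ht⟩ := hmt
              subst hm; subst ht
              refine ⟨hf0, rfl, ?_, ?_⟩
              · intro v hv hvne hvf
                rcases List.mem_cons.1 hv with rfl | hv
                · omega
                · exact le_trans hle (hmin' v hv hvne hvf)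
              · have hE : t.isEmpty = false := by simp [List.isEmpty_iff, hu]
                simp [List.find?, hE, hustart]
            · have hmt : m = m' ∧ t = t' := by
                have := h; simp [bestOf, hu, hf1, hb, hle] at this; exact ⟨this.1.symm, this.2.symm⟩
              obtain ⟨hm, ht⟩ := hmt
              subst hm; subst ht
              refine ⟨h0', hf', ?_, ?_⟩
              · intro v hv hvne hvf
                rcases List.mem_cons.1 hv with rfl | hv
                · omega
                · exact hmin' v hv hvne hvf
              · have hnost : PySem.Chars.startswith (cs.drop m.toNat) u = false := by
                  apply hnostart_lt; omega
                simpa [List.find?, hu, hnost] using hfind'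

theorem foldA_some (cs : List Char) (ts : List (List Char)) : ∀ (m : Int) (t : List Char),
    ts.foldl (cutStepA cs) (some m, some t) =
      (match bestOf cs ts with
       | none => (some m, some t)
       | some (m', t') => if m' < m then (some m', some t') else (some m, some t)) := by
  induction ts with
  | nil => intro m t; rfl
  | cons u r ih =>
    intro m t
    by_cases hu : u = []
    · simpa [List.foldl_cons, cutStepA, bestOf, hu] using ih m t
    · by_cases hf1 : PySem.Chars.find cs u = -1
      · simpa [List.foldl_cons, cutStepA, bestOf, hu, hf1] using ih m t
      · by_cases hlt : PySem.Chars.find cs u < m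
        · rw [List.foldl_cons]
          have hstep : cutStepA cs (some m, some t) u = (some (PySem.Chars.find cs u), some u) := by
            simp [cutStepA, hu, hf1, hlt]
          rw [hstep, ih (PySem.Chars.find cs u) u]
          cases hb : bestOf cs r with
          | none => simp [bestOf, hu, hf1, hb, hlt]
          | some p =>
            rcases p with ⟨m', t'⟩
            by_cases hle : PySem.Chars.find cs u ≤ m'
            · have h1 : ¬ m' < PySem.Chars.find cs u := by omega
              simp [bestOf, hu, hf1, hb, hle, h1, hlt]
            · have h1 : m' < PySem.Chars.find cs u := by omega
              have h2 : m' < m := by omega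
              simp [bestOf, hu, hf1, hb, hle, h1, h2]
        · rw [List.foldl_cons]
          have hstep : cutStepA cs (some m, some t) u = (some m, some t) := by
            simp [cutStepA, hu, hf1]; omega
          rw [hstep, ih m t]
          cases hb : bestOf cs r with
          | none => simp [bestOf, hu, hf1, hb, hlt]
          | some p =>
            rcases p with ⟨m', t'⟩
            by_cases hle : PySem.Chars.find cs u ≤ m'
            · have h1 : ¬ m' < m := by omega
              simp [bestOf, hu, hf1, hb, hle, h1, hlt]
            · simp [bestOf, hu, hf1, hb, hle]
  
theorem foldA_none (cs : List Char) (ts : List (List Char)) :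
    ts.foldl (cutStepA cs) (none, none) =
      (match bestOf cs ts with
       | none => ((none : Option Int), (none : Option (List Char)))
       | some (m, t) => (some m, some t)) := by
  induction ts with
  | nil => rfl
  | cons u r ih =>
    by_cases hu : u = []
    · simpa [List.foldl_cons, cutStepA, bestOf, hu] using ih
    · by_cases hf1 : PySem.Chars.find cs u = -1
      · simpa [List.foldl_cons, cutStepA, bestOf, hu, hf1] using ih
      · rw [List.foldl_cons]
        have hstep : cutStepA cs (none, none) u = (some (PySem.Chars.find cs u), some u) := by
          simp [cutStepA, hu, hf1]
        rw [hstep, foldA_some cs r]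
        cases hb : bestOf cs r with
        | none => simp [bestOf, hu, hf1, hb]
        | some p =>
          rcases p with ⟨m', t'⟩
          by_cases hle : PySem.Chars.find cs u ≤ m'
          · have h1 : ¬ m' < PySem.Chars.find cs u := by omega
            simp [bestOf, hu, hf1, hb, hle, h1]
          · have h1 : m' < PySem.Chars.find cs u := by omega
            simp [bestOf, hu, hf1, hb, hle, h1]

theorem scanB_none (cs : List Char) (toks : List (List Char)) : ∀ (rest : List Char) (i : Nat),
    rest = cs.drop i →
    (∀ j, i ≤ j → toks.find? (fun t => PySem.Chars.startswith (cs.drop j) t) = none) →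
    cutScanB cs toks rest i = none := by
  intro rest
  induction rest with
  | nil => intro i _ _; rfl
  | cons c rest' ih =>
    intro i hrest h
    have hnext : rest' = cs.drop (i + 1) := by
      have := congrArg List.tail hrest
      simpa [List.tail_drop] using this
    simp only [cutScanB, h i (Nat.le_refl i)]
    exact ih (i + 1) hnext (fun j hj => h j (by omega))

theorem scanB_some (cs : List Char) (toks : List (List Char)) : ∀ (rest : List Char) (i : Nat)
    (j : Nat) (t : List Char), rest = cs.drop i → i ≤ j → j < cs.length →
    toks.find? (fun t => PySem.Chars.startswith (cs.drop j) t) = some t →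
    (∀ k, i ≤ k → k < j → toks.find? (fun t => PySem.Chars.startswith (cs.drop k) t) = none) →
    cutScanB cs toks rest i = some (j, t) := by
  intro rest
  induction rest with
  | nil =>
    intro i j t hrest hij hjlen _ _
    exfalso
    have : cs.length ≤ i := List.drop_eq_nil_iff.1 hrest.symm
    omega
  | cons c rest' ih =>
    intro i j t hrest hij hjlen hfound hmin
    have hnext : rest' = cs.drop (i + 1) := by
      have := congrArg List.tail hrest
      simpa [List.tail_drop] using this
    by_cases hij' : i = j
    · subst hij'
      simp [cutScanB, hfound]
    · have hi : toks.find? (fun t => PySem.Chars.startswith (cs.drop i) t) = none :=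
        hmin i (Nat.le_refl i) (by omega)
      simp only [cutScanB, hi]
      exact ih (i + 1) j t hnext (by omega) hjlen hfound (fun k hk1 hk2 => hmin k (by omega) hk2)

-- ===== VERDICT (by name: the statement is the Claim_ definition above) =====
theorem cut_before_any_spec : Claim_equal_cut_before_any := by
  intro s tokens _
  unfold Spec_cut_before_any cut_before_any cut_before_any_alt
  have hmap : tokens.foldl (fun st tok => cutStepA s.toList st tok.toList) (none, none)
      = (tokens.map String.toList).foldl (cutStepA s.toList) (none, none) := by
    rw [List.foldl_map]
  rw [hmap, foldA_none]
  cases hb : bestOf s.toList (tokens.map String.toList) with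
  | none =>
    have hall := (bestOf_spec s.toList (tokens.map String.toList)).1 hb
    have hscan : cutScanB s.toList ((tokens.map String.toList).filter (fun t => !t.isEmpty))
        s.toList 0 = none := by
      apply scanB_none _ _ _ 0 (by simp)
      intro j _
      apply List.find?_eq_none.2
      intro t ht hpt
      have hsw : PySem.Chars.startswith (s.toList.drop j) t = true := hpt
      have hmem := List.mem_filter.1 ht
      have htne : t ≠ [] := by simpa [List.isEmpty_iff] using hmem.2
      exact absurd (hall t hmem.1 htne)
        (find_le_of_prefix_drop s.toList t j ((PySem.Chars.startswith_iff _ _).1 hsw)).2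
    rw [hscan]
  | some p =>
    rcases p with ⟨m, t⟩
    obtain ⟨h0, hfmt, hmin, hfind⟩ := (bestOf_spec s.toList (tokens.map String.toList)).2 m t hb
    have hfound : ((tokens.map String.toList).filter (fun t => !t.isEmpty)).find?
        (fun u => PySem.Chars.startswith (s.toList.drop m.toNat) u) = some t := by
      rw [find?_filter_comm]; exact hfind
    have hpre : t <+: s.toList.drop m.toNat :=
      (PySem.Chars.startswith_iff _ _).1 (List.find?_some hfound)
    have htne : t ≠ [] := by
      have hp := List.find?_some hfind
      rw [Bool.and_eq_true] at hp
      simpa [List.isEmpty_iff] using hp.1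
    have hjlen : m.toNat < s.toList.length := by
      by_contra hc
      simp only [not_lt] at hc
      have hnil : s.toList.drop m.toNat = [] := List.drop_eq_nil_of_le hc
      exact htne (List.prefix_nil.1 (hnil ▸ hpre))
    have hscan : cutScanB s.toList ((tokens.map String.toList).filter (fun t => !t.isEmpty))
        s.toList 0 = some (m.toNat, t) := by
      apply scanB_some _ _ _ 0 m.toNat t (by simp) (Nat.zero_le _) hjlen hfound
      intro k _ hk
      apply List.find?_eq_none.2
      intro t' ht' hpt
      have hsw : PySem.Chars.startswith (s.toList.drop k) t' = true := hpt
      have hmem := List.mem_filter.1 ht'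
      have htne' : t' ≠ [] := by simpa [List.isEmpty_iff] using hmem.2
      obtain ⟨hle, hne⟩ := find_le_of_prefix_drop s.toList t' k ((PySem.Chars.startswith_iff _ _).1 hsw)
      have := hmin t' hmem.1 htne' hne
      omega
    rw [hscan]
    have hslice : PySem.List.slice s.toList none (some m) = s.toList.take m.toNat :=
      PySem.List.slice_to s.toList h0
    simp [hslice]
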